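-- pv_equiv track=rewrite | github.com/sdrdis/s1_parking_occupancy | common.py | get_direction_orbit
-- ===== SOURCE A (Python) =====
-- def get_direction_orbit(fileid):
--     direction = None
--     orbit = None
--     for el in fileid:
--         if (el.startswith('ASC')):
--             direction = 'ASCENDING'
--         if (el.startswith('DES')):
--             direction = 'DESCENDING'
--         if (len(el) == 3 and el.isnumeric()):
--             orbit = el
--
--     return direction, orbit
-- ===== SOURCE B (Python) =====
-- def get_direction_orbit(fileid):
--     items = list(fileid)
--     direction = next(('ASCENDING' if el.startswith('ASC') else 'DESCENDING'
--                       for el in reversed(items)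
--                       if el.startswith('ASC') or el.startswith('DES')), None)
--     orbit = next((el for el in reversed(items) if len(el) == 3 and el.isnumeric()), None)
--     return direction, orbit
-- ===== Notes on version B (the rewrite author's own statement) =====
-- stated objective: idiomatic
-- what changed: Replaces the forward last-wins accumulation loop with two independent reverse-order first-match searches (next over reversed(items)), eliminating the mutable accumulators.
import Mathlib
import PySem

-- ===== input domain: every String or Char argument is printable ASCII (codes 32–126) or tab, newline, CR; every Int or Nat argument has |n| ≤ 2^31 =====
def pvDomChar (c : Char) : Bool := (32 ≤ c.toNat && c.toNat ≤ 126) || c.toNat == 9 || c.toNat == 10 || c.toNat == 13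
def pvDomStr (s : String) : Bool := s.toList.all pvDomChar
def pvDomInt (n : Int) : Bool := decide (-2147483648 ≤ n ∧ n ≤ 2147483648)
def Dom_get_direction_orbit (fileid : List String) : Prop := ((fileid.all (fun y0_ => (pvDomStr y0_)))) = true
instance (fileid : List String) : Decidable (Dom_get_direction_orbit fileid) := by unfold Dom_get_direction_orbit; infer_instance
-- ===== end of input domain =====

-- B replaces A's forward last-wins accumulation loop with two reverse-order first-match searches (idiomatic).
-- 'el.isnumeric()' is ported as PySem.Str.strIsdigit in both ports (exact on the ASCII domain).

-- ===== PORT A =====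
-- one loop iteration: the three independent ifs, updating the (direction, orbit) state
def pvStepA (s : Option String × Option String) (el : String) : Option String × Option String :=
  let d := if PySem.Str.startswith el "ASC" then some "ASCENDING" else s.1
  let d := if PySem.Str.startswith el "DES" then some "DESCENDING" else d
  let o := if PySem.Str.len el == 3 && PySem.Str.strIsdigit el then some el else s.2
  (d, o)

def get_direction_orbit (fileid : List String) : Option String × Option String :=
  fileid.foldl pvStepA (none, none)

-- ===== PORT B =====
def pvIsDir (el : String) : Bool := PySem.Str.startswith el "ASC" || PySem.Str.startswith el "DES"
def pvIsOrb (el : String) : Bool := PySem.Str.len el == 3 && PySem.Str.strIsdigit el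

def get_direction_orbit_alt (fileid : List String) : Option String × Option String :=
  ((fileid.reverse.find? pvIsDir).map
      (fun el => if PySem.Str.startswith el "ASC" then "ASCENDING" else "DESCENDING"),
   fileid.reverse.find? pvIsOrb)

-- ===== PRECONDITION & SPEC =====
def Spec_get_direction_orbit (fileid : List String) (out : Option String × Option String) : Prop := out = get_direction_orbit_alt fileid
instance (fileid : List String) (out : Option String × Option String) : Decidable (Spec_get_direction_orbit fileid out) := by unfold Spec_get_direction_orbit; infer_instance

-- ===== CLAIM (what is proved, stated in full; the proofs are below) =====
def Claim_equal_get_direction_orbit : Prop := ∀ (fileid : List String), Dom_get_direction_orbit fileid → Spec_get_direction_orbit fileid (get_direction_orbit fileid)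

-- ===== LEMMAS AND PROOFS =====

-- a string cannot start with both "ASC" and "DES"
theorem pv_not_both (el : String) (h : PySem.Chars.startswith el.toList ['A','S','C'] = true) :
    PySem.Chars.startswith el.toList ['D','E','S'] = false := by
  by_contra hD
  rw [Bool.not_eq_false] at hD
  rw [PySem.Chars.startswith_iff] at h hD
  have h1 := List.prefix_iff_eq_take.mp h
  have h2 := List.prefix_iff_eq_take.mp hD
  simp at h1 h2
  exact absurd (h1.trans h2.symm) (by decide)

-- the direction value B assigns to a matching element
def pvDirOf (el : String) : String :=
  if PySem.Str.startswith el "ASC" then "ASCENDING" else "DESCENDING"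

-- loop invariant: A's fold from any state = first match in reverse, falling back to the state
theorem pv_foldl_eq (xs : List String) (s : Option String × Option String) :
    xs.foldl pvStepA s =
      ((xs.reverse.find? pvIsDir).elim s.1 (fun el => some (pvDirOf el)),
       (xs.reverse.find? pvIsOrb).elim s.2 some) := by
  induction xs using List.reverseRecOn generalizing s with
  | nil => simp
  | append_singleton xs x ih =>
    rw [List.foldl_append, List.foldl_cons, List.foldl_nil, ih]
    rw [List.reverse_append, List.reverse_singleton, List.singleton_append,
        List.find?_cons, List.find?_cons]
    unfold pvStepA pvIsDir pvIsOrb pvDirOf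
    by_cases hL : (x.length : Int) = 3
    all_goals by_cases hDig : PySem.Chars.strIsdigit x.toList = true
    all_goals by_cases hA : PySem.Chars.startswith x.toList ['A','S','C'] = true
    all_goals try have hD := pv_not_both x hA
    all_goals by_cases hD : PySem.Chars.startswith x.toList ['D','E','S'] = true
    all_goals simp_all [beq_eq_decide]

-- ===== VERDICT (by name: the statement is the Claim_ definition above) =====
theorem get_direction_orbit_spec : Claim_equal_get_direction_orbit := by
  intro fileid _
  unfold Spec_get_direction_orbit get_direction_orbit get_direction_orbit_alt
  rw [pv_foldl_eq]
  cases fileid.reverse.find? pvIsDir <;> cases fileid.reverse.find? pvIsOrb <;>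
    simp [pvDirOf]
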